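-- pv_equiv track=rewrite | github.com/taimurislamkhan/USHS_Screens | python/modbus_map.py | registers_to_string
-- ===== SOURCE A (Python) =====
-- def registers_to_string(registers):
--     """Convert register array to string"""
--     text = ""
--     for reg in registers:
--         char1 = (reg >> 8) & 0xFF
--         char2 = reg & 0xFF
--         if char1: text += chr(char1)
--         if char2: text += chr(char2)
--     return text.rstrip('\0')
-- ===== SOURCE B (Python) =====
-- def registers_to_string(registers):
--     """Convert register array to string"""
--     buf = bytearray()
--     for reg in registers:
--         buf.append((reg >> 8) & 0xFF)
--         buf.append(reg & 0xFF)
--     return bytes(buf).translate(None, delete=b'\x00').decode('latin-1')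
-- ===== Notes on version B (the rewrite author's own statement) =====
-- stated objective: idiomatic
-- what changed: B packs both bytes of every register into one bytearray, deletes NUL bytes in bulk with bytes.translate and decodes the buffer once via latin-1, instead of A's per-byte chr() concatenation behind truthiness tests plus a final rstrip.
import Mathlib
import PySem

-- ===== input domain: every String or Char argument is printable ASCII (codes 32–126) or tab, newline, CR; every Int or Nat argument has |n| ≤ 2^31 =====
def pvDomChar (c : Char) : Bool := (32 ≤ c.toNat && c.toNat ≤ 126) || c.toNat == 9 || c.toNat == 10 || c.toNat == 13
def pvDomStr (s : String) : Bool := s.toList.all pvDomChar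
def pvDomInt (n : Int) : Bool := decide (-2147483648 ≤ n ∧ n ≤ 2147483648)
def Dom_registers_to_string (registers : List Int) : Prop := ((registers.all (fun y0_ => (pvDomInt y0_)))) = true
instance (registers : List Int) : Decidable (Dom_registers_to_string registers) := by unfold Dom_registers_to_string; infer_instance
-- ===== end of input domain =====

-- B replaces A's per-byte chr() concatenation (with truthiness tests and a final rstrip)
-- by one byte buffer, bulk NUL deletion and a single latin-1 decode; objective: idiomatic.

-- ===== PORT A =====
-- chr(n): exact for 0 ≤ n < 0xD800 (here bytes 0..255)
def pyChr (n : Int) : Char := Char.ofNat n.toNat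
-- text.rstrip('\0'): drop trailing NUL characters — exact hand port of str.rstrip with a single-char argument
def rstripNull (cs : List Char) : List Char := (cs.reverse.dropWhile (fun c => c == '\x00')).reverse

def registers_to_string (registers : List Int) : String :=
  let text := registers.foldl (fun (text : List Char) (reg : Int) =>
    let char1 := PySem.Int.band (reg >>> (8 : Nat)) 255
    let char2 := PySem.Int.band reg 255
    let text := if char1 ≠ 0 then text ++ [pyChr char1] else text
    if char2 ≠ 0 then text ++ [pyChr char2] else text) ([] : List Char)
  String.mk (rstripNull text)

-- ===== PORT B =====
def registers_to_string_alt (registers : List Int) : String :=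
  -- the bytearray built by the loop (two bytes appended per register)
  let buf := registers.flatMap (fun (reg : Int) =>
    [PySem.Int.band (reg >>> (8 : Nat)) 255, PySem.Int.band reg 255])
  -- bytes(buf).translate(None, delete=b'\x00') then .decode('latin-1'); latin-1 decode of a byte is exactly its code point
  String.mk ((buf.filter (fun b => b ≠ 0)).map (fun b => Char.ofNat b.toNat))

-- ===== PRECONDITION & SPEC =====
def Spec_registers_to_string (registers : List Int) (out : String) : Prop := out = registers_to_string_alt registers
instance (registers : List Int) (out : String) : Decidable (Spec_registers_to_string registers out) := by unfold Spec_registers_to_string; infer_instance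

-- ===== CLAIM (what is proved, stated in full; the proofs are below) =====
def Claim_equal_registers_to_string : Prop := ∀ (registers : List Int), Dom_registers_to_string registers → Spec_registers_to_string registers (registers_to_string registers)

-- ===== LEMMAS AND PROOFS =====

lemma band255_bounds (a : Int) : 0 ≤ PySem.Int.band a 255 ∧ PySem.Int.band a 255 < 256 := by
  unfold PySem.Int.band
  split_ifs with h1 h2 h3
  · have h := Nat.and_le_right (n := a.toNat) (m := (255 : Int).toNat)
    omega
  · omega
  · omega
  · omega

lemma chrByte_ne_null (b : Int) (hb : 0 < b) (hb' : b < 256) : ¬ (Char.ofNat b.toNat == '\x00') = true := by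
  intro h
  have hE : Char.ofNat b.toNat = '\x00' := by exact eq_of_beq h
  have hv : b.toNat.isValidChar := Or.inl (by omega)
  have : (Char.ofNat b.toNat).toNat = b.toNat := by
    simp [Char.ofNat, hv]
  rw [hE] at this
  have : (0 : Nat) = b.toNat := this
  omega

lemma rstripNull_of_no_null (cs : List Char) (h : ∀ c ∈ cs, ¬ (c == '\x00') = true) :
    rstripNull cs = cs := by
  unfold rstripNull
  cases hr : cs.reverse with
  | nil =>
    have hnil := List.reverse_eq_nil_iff.mp hr
    subst hnil; simp
  | cons a t =>
    have ha : a ∈ cs := by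
      have : a ∈ cs.reverse := by rw [hr]; exact List.mem_cons_self
      simpa using this
    rw [List.dropWhile_cons_of_neg (by simpa using h a ha)]
    rw [← hr, List.reverse_reverse]

-- the A-loop builds exactly the filtered-and-decoded buffer, for any accumulator
lemma loop_eq (l : List Int) (acc : List Char) :
    l.foldl (fun (text : List Char) (reg : Int) =>
      let char1 := PySem.Int.band (reg >>> (8 : Nat)) 255
      let char2 := PySem.Int.band reg 255
      let text := if char1 ≠ 0 then text ++ [pyChr char1] else text
      if char2 ≠ 0 then text ++ [pyChr char2] else text) acc
    = acc ++ (((l.flatMap (fun (reg : Int) =>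
        [PySem.Int.band (reg >>> (8 : Nat)) 255, PySem.Int.band reg 255])).filter
          (fun b => b ≠ 0)).map (fun b => Char.ofNat b.toNat)) := by
  induction l generalizing acc with
  | nil => simp
  | cons reg rest ih =>
    rw [List.foldl_cons, ih]
    by_cases h1 : PySem.Int.band (reg >>> (8 : Nat)) 255 = 0 <;>
      by_cases h2 : PySem.Int.band reg 255 = 0 <;>
        simp [h1, h2, pyChr, List.append_assoc]

-- ===== VERDICT (by name: the statement is the Claim_ definition above) =====
theorem registers_to_string_spec : Claim_equal_registers_to_string := by
  intro registers _
  unfold Spec_registers_to_string registers_to_string registers_to_string_alt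
  simp only [loop_eq, List.nil_append]
  congr 1
  apply rstripNull_of_no_null
  intro c hc
  rcases List.mem_map.mp hc with ⟨b, hb, rfl⟩
  rcases List.mem_filter.mp hb with ⟨hbuf, hne⟩
  rcases List.mem_flatMap.mp hbuf with ⟨reg, _, hbm⟩
  have hb0 : 0 < b ∧ b < 256 := by
    simp only [List.mem_cons] at hbm
    have hne' : b ≠ 0 := by simpa using hne
    rcases hbm with rfl | hbm
    · have := band255_bounds (reg >>> (8 : Nat))
      omega
    · rcases hbm with rfl | h
      · have := band255_bounds reg
        omega
      · cases h
  exact chrByte_ne_null b hb0.1 hb0.2
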